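-- pv_equiv track=rewrite | github.com/c-mellina/spacetime-crawler4py | dup_detector.py | bytes_to_bits
-- ===== SOURCE A (Python) =====
-- def bytes_to_bits(bytes):
--     return_bits = []
--     for byte in bytes:
--         for i in range(8):
--             # Access bit at 0: (left to right)
--             # Ex. 10101110
--             # Shift right 7 -> 00000001
--             # Access bit at 1: (left to right)
--             # Ex. 10101110
--             # Shift right 6 -> 00000010
--             # Isolate last bit -> 0
--             bit = (byte >> (7 - i))
--             bit &= 1
--             return_bits.append(bit)
--
--     return return_bits
-- ===== SOURCE B (Python) =====
-- def bytes_to_bits(bytes):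
--     # Per byte: reduce to the low 8 bits once (byte % 256), then peel the bits
--     # LSB-first by repeated divmod-by-2 and reverse the 8-bit chunk to MSB-first.
--     out = []
--     for byte in bytes:
--         v = byte % 256
--         chunk = []
--         for _ in range(8):
--             chunk.append(v % 2)
--             v //= 2
--         out.extend(reversed(chunk))
--     return out
-- ===== Notes on version B (the rewrite author's own statement) =====
-- stated objective: alternative
-- what changed: Instead of recomputing a shift (byte >> (7-i)) & 1 for each of the 8 bit positions, B masks the byte once with % 256 and peels its bits LSB-first by repeated divmod-by-2, reversing the 8-bit chunk to MSB-first.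
import Mathlib
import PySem

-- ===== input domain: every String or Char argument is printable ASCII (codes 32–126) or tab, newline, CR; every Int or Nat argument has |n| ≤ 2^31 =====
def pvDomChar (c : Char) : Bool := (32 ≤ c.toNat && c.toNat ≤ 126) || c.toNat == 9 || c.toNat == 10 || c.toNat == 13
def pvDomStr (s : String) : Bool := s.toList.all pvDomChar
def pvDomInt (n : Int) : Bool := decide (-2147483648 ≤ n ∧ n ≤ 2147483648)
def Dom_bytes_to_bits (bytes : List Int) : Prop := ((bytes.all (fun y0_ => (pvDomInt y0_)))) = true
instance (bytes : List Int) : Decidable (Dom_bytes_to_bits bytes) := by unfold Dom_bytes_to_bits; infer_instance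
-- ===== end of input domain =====

-- B peels each byte's bits LSB-first by repeated divmod-by-2 after reducing the byte once
-- with % 256, then reverses the 8-bit chunk, instead of A's per-position shift-and-mask.

-- ===== PORT A =====
-- inner loop: for i in range(8): bit = (byte >> (7 - i)); bit &= 1; return_bits.append(bit)
def bytes_to_bits (bytes : List Int) : List Int :=
  bytes.foldl (fun acc (byte : Int) =>
    (List.range 8).foldl (fun acc2 (i : Nat) =>
      acc2 ++ [PySem.Int.band (byte >>> (7 - i)) 1]) acc) []

-- ===== PORT B =====
-- the inner "for _ in range(8): chunk.append(v % 2); v //= 2" loop of Source B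
def bbChunk : Int → Nat → List Int
  | _, 0 => []
  | v, n+1 => PySem.Int.mod v 2 :: bbChunk (PySem.Int.floordiv v 2) n

-- outer loop: v = byte % 256; build chunk LSB-first; out.extend(reversed(chunk))
def bytes_to_bits_alt (bytes : List Int) : List Int :=
  bytes.foldl (fun acc (byte : Int) => acc ++ (bbChunk (PySem.Int.mod byte 256) 8).reverse) []

-- ===== PRECONDITION & SPEC =====
def Spec_bytes_to_bits (bytes : List Int) (out : List Int) : Prop := out = bytes_to_bits_alt bytes
instance (bytes : List Int) (out : List Int) : Decidable (Spec_bytes_to_bits bytes out) := by unfold Spec_bytes_to_bits; infer_instance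

-- ===== CLAIM (what is proved, stated in full; the proofs are below) =====
def Claim_equal_bytes_to_bits : Prop := ∀ (bytes : List Int), Dom_bytes_to_bits bytes → Spec_bytes_to_bits bytes (bytes_to_bits bytes)

-- ===== LEMMAS AND PROOFS =====

theorem bb_shr (b : Int) (k : Nat) : b >>> k = b / 2 ^ k := by
  simp [Int.shiftRight_eq_div_pow]

-- A's inner shift-and-mask loop produces exactly B's reversed divmod chunk of byte % 256
theorem bb_byte_eq (byte : Int) (acc : List Int) :
    (List.range 8).foldl (fun acc2 (i : Nat) =>
      acc2 ++ [PySem.Int.band (byte >>> (7 - i)) 1]) acc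
      = acc ++ (bbChunk (PySem.Int.mod byte 256) 8).reverse := by
  show acc ++ [PySem.Int.band (byte >>> (7:Nat)) 1] ++ [PySem.Int.band (byte >>> (6:Nat)) 1]
      ++ [PySem.Int.band (byte >>> (5:Nat)) 1] ++ [PySem.Int.band (byte >>> (4:Nat)) 1]
      ++ [PySem.Int.band (byte >>> (3:Nat)) 1] ++ [PySem.Int.band (byte >>> (2:Nat)) 1]
      ++ [PySem.Int.band (byte >>> (1:Nat)) 1] ++ [PySem.Int.band (byte >>> (0:Nat)) 1] = _
  simp only [bbChunk, List.reverse_cons, List.reverse_nil, PySem.Int.band_one,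
    PySem.Int.mod_eq_emod_of_pos (b := 2) (by omega),
    PySem.Int.mod_eq_emod_of_pos (b := 256) (by omega),
    PySem.Int.floordiv_eq_ediv_of_pos (b := 2) (by omega),
    bb_shr, List.append_assoc, List.nil_append, List.cons_append]
  norm_num
  and_intros <;> omega

theorem bb_fold_eq (bytes : List Int) (acc : List Int) :
    bytes.foldl (fun acc (byte : Int) =>
      (List.range 8).foldl (fun acc2 (i : Nat) =>
        acc2 ++ [PySem.Int.band (byte >>> (7 - i)) 1]) acc) acc
    = bytes.foldl (fun acc (byte : Int) => acc ++ (bbChunk (PySem.Int.mod byte 256) 8).reverse) acc := by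
  induction bytes generalizing acc with
  | nil => rfl
  | cons b bs ih => simp only [List.foldl, bb_byte_eq]

-- ===== VERDICT (by name: the statement is the Claim_ definition above) =====
theorem bytes_to_bits_spec : Claim_equal_bytes_to_bits := by
  intro bytes _
  unfold Spec_bytes_to_bits bytes_to_bits bytes_to_bits_alt
  exact bb_fold_eq bytes []
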